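-- pv_equiv track=rewrite | github.com/sshaayan/Checkers-AI | main.py | freeMovement
-- ===== SOURCE A (Python) =====
-- borderMask = 0b11111111011111111011111111011111111
--
-- def freeMovement(whiteParam, blackParam, kingParam, colorParam):
--     movementVal = 0
--     emptyPos = (~whiteParam) & (~blackParam) & borderMask
--
--     DRMoves = 0
--     DLMoves = 0
--     URMoves = 0
--     ULMoves = 0
--     if colorParam == "BLACK":
--         DRMoves = (emptyPos << 5) & blackParam
--         DLMoves = (emptyPos << 4) & blackParam
--         URMoves = (emptyPos >> 4) & blackParam & kingParam
--         ULMoves = (emptyPos >> 5) & blackParam & kingParam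
--     else:
--         URMoves = (emptyPos >> 4) & whiteParam
--         ULMoves = (emptyPos >> 5) & whiteParam
--         DLMoves = (emptyPos << 4) & whiteParam & kingParam
--         DRMoves = (emptyPos << 5) & whiteParam & kingParam
--
--     for bit in bin(DRMoves):
--         movementVal += (1 if bit == '1' else 0)
--     for bit in bin(DLMoves):
--         movementVal += (1 if bit == '1' else 0)
--     for bit in bin(URMoves):
--         movementVal += (1 if bit == '1' else 0)
--     for bit in bin(ULMoves):
--         movementVal += (1 if bit == '1' else 0)
--
--     return movementVal
-- ===== SOURCE B (Python) =====
-- borderMask = 0b11111111011111111011111111011111111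
--
-- def freeMovement(whiteParam, blackParam, kingParam, colorParam):
--     # Per-square scan: instead of building four move bitmasks and popcounting
--     # them, walk the 35 board positions once; for each empty border square,
--     # add the occupancy bits of the four diagonal neighbours directly.
--     if colorParam == "BLACK":
--         down = blackParam
--         up = blackParam & kingParam
--     else:
--         down = whiteParam & kingParam
--         up = whiteParam
--     total = 0
--     for i in range(35):
--         if (borderMask >> i) & 1 and not (whiteParam >> i) & 1 and not (blackParam >> i) & 1:
--             total += (down >> (i + 5)) & 1
--             total += (down >> (i + 4)) & 1
--             if i >= 4:
--                 total += (up >> (i - 4)) & 1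
--             if i >= 5:
--                 total += (up >> (i - 5)) & 1
--     return total
-- ===== Notes on version B (the rewrite author's own statement) =====
-- stated objective: alternative
-- what changed: Instead of building four shifted move bitmasks and popcounting each via the characters of bin(mask), B never constructs a move mask at all: it scans the 35 board squares once and, for each empty border square, directly adds the occupancy bits of its four diagonal neighbour positions.
import Mathlib
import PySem

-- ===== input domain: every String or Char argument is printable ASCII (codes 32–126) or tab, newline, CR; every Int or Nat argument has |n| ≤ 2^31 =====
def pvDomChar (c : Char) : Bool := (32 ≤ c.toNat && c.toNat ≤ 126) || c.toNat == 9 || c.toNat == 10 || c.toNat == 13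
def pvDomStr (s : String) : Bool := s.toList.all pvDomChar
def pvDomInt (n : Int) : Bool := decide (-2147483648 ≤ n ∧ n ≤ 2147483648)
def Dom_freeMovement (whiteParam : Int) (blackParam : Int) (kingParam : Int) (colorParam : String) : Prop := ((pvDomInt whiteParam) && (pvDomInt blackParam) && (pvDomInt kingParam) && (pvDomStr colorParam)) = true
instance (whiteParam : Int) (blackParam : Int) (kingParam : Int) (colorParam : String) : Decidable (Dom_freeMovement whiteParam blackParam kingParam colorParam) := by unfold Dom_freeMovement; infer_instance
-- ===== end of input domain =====

-- B replaces A's four move bitmasks + popcount-by-binary-string with a single per-square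
-- scan of the 35 board positions that sums neighbour occupancy bits; objective: alternative.

-- ===== PORT A =====
def borderMask : Int := 0b11111111011111111011111111011111111

def freeMovement (whiteParam : Int) (blackParam : Int) (kingParam : Int) (colorParam : String) : Int :=
  let movementVal : Int := 0
  let emptyPos : Int := PySem.Int.band (PySem.Int.band (Int.not whiteParam) (Int.not blackParam)) borderMask
  let masks : Int × Int × Int × Int :=         -- (DRMoves, DLMoves, URMoves, ULMoves)
    if colorParam == "BLACK" then
      (PySem.Int.band (emptyPos <<< (5:Nat)) blackParam,
       PySem.Int.band (emptyPos <<< (4:Nat)) blackParam,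
       PySem.Int.band (PySem.Int.band (emptyPos >>> (4:Nat)) blackParam) kingParam,
       PySem.Int.band (PySem.Int.band (emptyPos >>> (5:Nat)) blackParam) kingParam)
    else
      (PySem.Int.band (PySem.Int.band (emptyPos <<< (5:Nat)) whiteParam) kingParam,
       PySem.Int.band (PySem.Int.band (emptyPos <<< (4:Nat)) whiteParam) kingParam,
       PySem.Int.band (emptyPos >>> (4:Nat)) whiteParam,
       PySem.Int.band (emptyPos >>> (5:Nat)) whiteParam)
  -- 'for bit in bin(X): movementVal += (1 if bit == '1' else 0)', four times
  let movementVal := (PySem.Int.pyBin masks.1).toList.foldl (fun acc bit => acc + (if bit = '1' then 1 else 0)) movementVal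
  let movementVal := (PySem.Int.pyBin masks.2.1).toList.foldl (fun acc bit => acc + (if bit = '1' then 1 else 0)) movementVal
  let movementVal := (PySem.Int.pyBin masks.2.2.1).toList.foldl (fun acc bit => acc + (if bit = '1' then 1 else 0)) movementVal
  let movementVal := (PySem.Int.pyBin masks.2.2.2).toList.foldl (fun acc bit => acc + (if bit = '1' then 1 else 0)) movementVal
  movementVal

-- ===== PORT B =====
-- One pass over the 35 board squares: for every empty border square i, add the
-- occupancy bit of each of the four diagonal neighbour positions directly.
def freeMovement_alt (whiteParam : Int) (blackParam : Int) (kingParam : Int) (colorParam : String) : Int :=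
  let du : Int × Int :=                        -- (down, up)
    if colorParam == "BLACK" then (blackParam, PySem.Int.band blackParam kingParam)
    else (PySem.Int.band whiteParam kingParam, whiteParam)
  (PySem.List.pyRange 0 35).foldl (fun (total i : Int) =>
    if PySem.Int.band (borderMask >>> i.toNat) 1 ≠ 0 ∧
       PySem.Int.band (whiteParam >>> i.toNat) 1 = 0 ∧
       PySem.Int.band (blackParam >>> i.toNat) 1 = 0 then
      let total := total + PySem.Int.band (du.1 >>> (i + 5).toNat) 1
      let total := total + PySem.Int.band (du.1 >>> (i + 4).toNat) 1
      let total := if 4 ≤ i then total + PySem.Int.band (du.2 >>> (i - 4).toNat) 1 else total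
      if 5 ≤ i then total + PySem.Int.band (du.2 >>> (i - 5).toNat) 1 else total
    else total) 0

-- ===== PRECONDITION & SPEC =====
def Spec_freeMovement (whiteParam : Int) (blackParam : Int) (kingParam : Int) (colorParam : String) (out : Int) : Prop := out = freeMovement_alt whiteParam blackParam kingParam colorParam
instance (whiteParam : Int) (blackParam : Int) (kingParam : Int) (colorParam : String) (out : Int) : Decidable (Spec_freeMovement whiteParam blackParam kingParam colorParam out) := by unfold Spec_freeMovement; infer_instance

-- ===== CLAIM (what is proved, stated in full; the proofs are below) =====
def Claim_equal_freeMovement : Prop := ∀ (whiteParam : Int) (blackParam : Int) (kingParam : Int) (colorParam : String), Dom_freeMovement whiteParam blackParam kingParam colorParam → Spec_freeMovement whiteParam blackParam kingParam colorParam (freeMovement whiteParam blackParam kingParam colorParam)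

-- ===== LEMMAS AND PROOFS =====

-- Nat bit infrastructure
lemma mod_two_ite (u : Nat) : u % 2 = if u.testBit 0 then 1 else 0 := by
  rcases Nat.mod_two_eq_zero_or_one u with h | h <;> simp [Nat.testBit_zero, h]

lemma and_div2 (x y : Nat) : (x &&& y) / 2 = (x / 2) &&& (y / 2) := by
  apply Nat.eq_of_testBit_eq
  intro i
  rw [← Nat.testBit_add_one, Nat.testBit_and, Nat.testBit_and,
      Nat.testBit_add_one, Nat.testBit_add_one]

lemma ldiff_div2 (x y : Nat) : (x.ldiff y) / 2 = (x / 2).ldiff (y / 2) := by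
  apply Nat.eq_of_testBit_eq
  intro i
  rw [← Nat.testBit_add_one, Nat.testBit_ldiff, Nat.testBit_ldiff,
      Nat.testBit_add_one, Nat.testBit_add_one]

lemma and_ldiff_add (x y : Nat) : (x &&& y) + x.ldiff y = x := by
  induction x using Nat.strong_induction_on generalizing y with
  | _ x ih =>
    by_cases hx : x = 0
    · subst hx
      have h1 : (0 : Nat) &&& y = 0 := Nat.zero_and y
      have h2 : Nat.ldiff 0 y = 0 :=
        Nat.eq_of_testBit_eq (fun i => by simp [Nat.testBit_ldiff, Nat.zero_testBit])
      rw [h1, h2]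
    · have hih := ih (x / 2) (Nat.div_lt_self (Nat.pos_of_ne_zero hx) (by omega)) (y := y / 2)
      have ha : x &&& y = 2 * ((x / 2) &&& (y / 2)) + (x &&& y) % 2 := by
        rw [← and_div2]; omega
      have hl : x.ldiff y = 2 * ((x / 2).ldiff (y / 2)) + (x.ldiff y) % 2 := by
        rw [← ldiff_div2]; omega
      have hp : (x &&& y) % 2 + (x.ldiff y) % 2 = x % 2 := by
        rw [mod_two_ite (x &&& y), mod_two_ite (x.ldiff y), mod_two_ite x,
            Nat.testBit_and, Nat.testBit_ldiff]
        cases hxb : x.testBit 0 <;> cases hyb : y.testBit 0 <;> simp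
      omega

lemma sub_and (x y : Nat) : x - (x &&& y) = x.ldiff y := by
  have := and_ldiff_add x y; omega

-- Int bit representation lemmas
lemma tb_natCast (n : Nat) (j : Nat) : ((n : Int)).testBit j = n.testBit j := rfl

lemma tb_nonneg (a : Int) (h : 0 ≤ a) (j : Nat) : a.testBit j = a.toNat.testBit j := by
  cases a with
  | ofNat n => rfl
  | negSucc n => exact absurd h (by simp)

lemma tb_neg (a : Int) (h : a < 0) (j : Nat) : a.testBit j = !((-a - 1).toNat.testBit j) := by
  cases a with
  | ofNat n => exact absurd h (by simp)
  | negSucc n =>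
    have : (-(Int.negSucc n) - 1).toNat = n := by
      rw [Int.neg_negSucc]; simp
    rw [this]
    rfl

lemma negSucc_form (x : Nat) : (-(x : Int) - 1) = Int.negSucc x := by
  rw [Int.negSucc_eq]; ring

lemma testBit_band (a b : Int) (j : Nat) :
    (PySem.Int.band a b).testBit j = (a.testBit j && b.testBit j) := by
  unfold PySem.Int.band
  by_cases ha : 0 ≤ a <;> by_cases hb : 0 ≤ b <;> simp only [ha, hb, if_true, if_false]
  · rw [tb_natCast, Nat.testBit_and, tb_nonneg a ha, tb_nonneg b hb]
  · rw [tb_natCast, sub_and, Nat.testBit_ldiff, tb_nonneg a ha, tb_neg b (by omega)]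
  · rw [tb_natCast, sub_and, Nat.testBit_ldiff, tb_nonneg b hb, tb_neg a (by omega)]
    cases a.toNat.testBit j <;> cases b.toNat.testBit j <;> simp_all
  · rw [negSucc_form]
    show (!((-a - 1).toNat ||| (-b - 1).toNat).testBit j) = _
    rw [Nat.testBit_or, tb_neg a (by omega), tb_neg b (by omega)]
    cases (-a - 1).toNat.testBit j <;> cases (-b - 1).toNat.testBit j <;> simp

lemma testBit_not (a : Int) (j : Nat) : (Int.not a).testBit j = !a.testBit j := by
  cases a with
  | ofNat n => simp [Int.not, Int.testBit]
  | negSucc n => simp [Int.not, Int.testBit]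

lemma testBit_shiftRightI (a : Int) (s j : Nat) : (a >>> s).testBit j = a.testBit (s + j) := by
  cases a with
  | ofNat n =>
    show (Int.ofNat (n >>> s)).testBit j = (Int.ofNat n).testBit (s + j)
    show (n >>> s).testBit j = n.testBit (s + j)
    rw [Nat.testBit_shiftRight]
  | negSucc n =>
    show (Int.negSucc (n >>> s)).testBit j = _
    show (!(n >>> s).testBit j) = (!n.testBit (s + j))
    rw [Nat.testBit_shiftRight]

lemma shiftLeft_natCast (n : Nat) (s : Nat) : ((n : Int) <<< s) = ((n <<< s : Nat) : Int) := by
  rw [Int.shiftLeft_eq, Nat.shiftLeft_eq]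
  push_cast
  ring

def bI (bo : Bool) : Int := if bo then 1 else 0

lemma mod_two_testBit (x : Int) : PySem.Int.mod x 2 = bI (x.testBit 0) := by
  rw [PySem.Int.mod_eq_emod_of_pos (by norm_num)]
  cases x with
  | ofNat n =>
    show (n : Int) % 2 = bI (n.testBit 0)
    rw [bI]
    rcases Nat.mod_two_eq_zero_or_one n with h | h <;> simp [Nat.testBit_zero, h] <;> omega
  | negSucc n =>
    show (Int.negSucc n) % 2 = bI (!n.testBit 0)
    rw [Int.negSucc_eq, bI]
    rcases Nat.mod_two_eq_zero_or_one n with h | h <;> simp [Nat.testBit_zero, h] <;> omega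

lemma ibit (n : Int) (k : Nat) : PySem.Int.band (n >>> k) 1 = bI (n.testBit k) := by
  rw [PySem.Int.band_one, mod_two_testBit, testBit_shiftRightI, Nat.add_zero]

-- popcount via halving, and its expansion as a sum of bits
def pc (n : Nat) : Nat :=
  if _h : n = 0 then 0 else pc (n / 2) + n % 2
termination_by n
decreasing_by exact Nat.div_lt_self (by omega) (by omega)

lemma pc_sum (K : Nat) (n : Nat) (hv : ∀ j, K ≤ j → n.testBit j = false) :
    (pc n : Int) = ∑ j ∈ Finset.range K, bI (n.testBit j) := by
  induction K generalizing n with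
  | zero =>
    have h0 : n = 0 := Nat.eq_of_testBit_eq (fun i => by rw [hv i (by omega), Nat.zero_testBit])
    subst h0
    rw [pc, dif_pos rfl]
    simp
  | succ K ih =>
    by_cases hn : n = 0
    · subst hn
      rw [pc, dif_pos rfl]
      simp [Nat.zero_testBit, bI]
    · rw [pc, dif_neg hn, Finset.sum_range_succ']
      have h2 : ∀ k, bI (n.testBit (k + 1)) = bI ((n / 2).testBit k) := by
        intro k; rw [Nat.testBit_add_one]
      simp only [h2]
      rw [← ih (n / 2) (fun j hj => by rw [← Nat.testBit_add_one]; exact hv (j + 1) (by omega))]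
      have h3 : (bI (n.testBit 0)) = ((n % 2 : Nat) : Int) := by
        rw [mod_two_ite n, bI]
        cases n.testBit 0 <;> simp
      rw [h3]
      push_cast
      ring

lemma pcBand (X m : Int) (hX : 0 ≤ X) (K : Nat) (hv : ∀ j, K ≤ j → X.testBit j = false) :
    (pc (PySem.Int.band X m).toNat : Int) = ∑ j ∈ Finset.range K, bI (X.testBit j && m.testBit j) := by
  have hM : 0 ≤ PySem.Int.band X m := PySem.Int.band_nonneg_of_nonneg_left m hX
  rw [pc_sum K _ (fun j hj => by
    rw [← tb_nonneg _ hM, testBit_band, hv j hj, Bool.false_and])]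
  exact Finset.sum_congr rfl (fun j _ => by rw [← tb_nonneg _ hM, testBit_band])

-- the bits of A's emptyPos
def ebit (w b : Int) (j : Nat) : Bool :=
  ((!w.testBit j && !b.testBit j) && borderMask.testBit j)

lemma border_tb (j : Nat) : borderMask.testBit j = (0b11111111011111111011111111011111111 : Nat).testBit j := rfl

lemma ebit_vanish (w b : Int) (j : Nat) (hj : 35 ≤ j) : ebit w b j = false := by
  have hb2 : borderMask.testBit j = false := by
    rw [border_tb]
    exact Nat.testBit_lt_two_pow
      (lt_of_lt_of_le (by norm_num) (Nat.pow_le_pow_right (by norm_num) hj))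
  simp [ebit, hb2]

lemma e_testBit (w b : Int) (j : Nat) :
    (PySem.Int.band (PySem.Int.band (Int.not w) (Int.not b)) borderMask).testBit j = ebit w b j := by
  rw [testBit_band, testBit_band, testBit_not, testBit_not]
  rfl

lemma shl_testBit (a : Int) (ha : 0 ≤ a) (s j : Nat) :
    (a <<< s).testBit j = (decide (s ≤ j) && a.testBit (j - s)) := by
  have h := (Int.toNat_of_nonneg ha).symm
  rw [h, shiftLeft_natCast, tb_natCast, Nat.testBit_shiftLeft, tb_natCast]

lemma sum_range_list (f : ℕ → ℤ) (n : ℕ) :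
    ((List.range n).map f).sum = ∑ i ∈ Finset.range n, f i := by
  induction n with
  | zero => simp
  | succ m ih => rw [Finset.sum_range_succ, List.range_succ]; simp [ih]

lemma assemble (w b : Int) (dd uu : Nat → Bool) :
    (∑ j ∈ Finset.range 40, bI ((decide (5 ≤ j) && ebit w b (j - 5)) && dd j))
  + (∑ j ∈ Finset.range 39, bI ((decide (4 ≤ j) && ebit w b (j - 4)) && dd j))
  + (∑ j ∈ Finset.range 31, bI (ebit w b (4 + j) && uu j))
  + (∑ j ∈ Finset.range 30, bI (ebit w b (5 + j) && uu j))
  = ∑ i ∈ Finset.range 35, (if ebit w b i then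
      bI (dd (5 + i)) + bI (dd (4 + i))
      + (if 4 ≤ i then bI (uu (i - 4)) else 0)
      + (if 5 ≤ i then bI (uu (i - 5)) else 0) else 0) := by
  have s1 : (∑ j ∈ Finset.range 40, bI ((decide (5 ≤ j) && ebit w b (j - 5)) && dd j))
      = ∑ i ∈ Finset.range 35, bI (ebit w b i && dd (5 + i)) := by
    rw [Finset.range_eq_Ico,
        ← Finset.sum_Ico_consecutive _ (show (0:ℕ) ≤ 5 by omega) (show (5:ℕ) ≤ 40 by omega)]
    have z1 : (∑ j ∈ Finset.Ico 0 5, bI ((decide (5 ≤ j) && ebit w b (j - 5)) && dd j)) = 0 :=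
      Finset.sum_eq_zero (fun j hj => by
        have : j < 5 := (Finset.mem_Ico.mp hj).2
        simp [bI, show ¬(5 ≤ j) by omega])
    rw [z1, zero_add, Finset.sum_Ico_eq_sum_range]
    exact Finset.sum_congr (by norm_num) (fun k _ => by
      have h1 : 5 + k - 5 = k := by omega
      simp [h1])
  have s2 : (∑ j ∈ Finset.range 39, bI ((decide (4 ≤ j) && ebit w b (j - 4)) && dd j))
      = ∑ i ∈ Finset.range 35, bI (ebit w b i && dd (4 + i)) := by
    rw [Finset.range_eq_Ico,
        ← Finset.sum_Ico_consecutive _ (show (0:ℕ) ≤ 4 by omega) (show (4:ℕ) ≤ 39 by omega)]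
    have z1 : (∑ j ∈ Finset.Ico 0 4, bI ((decide (4 ≤ j) && ebit w b (j - 4)) && dd j)) = 0 :=
      Finset.sum_eq_zero (fun j hj => by
        have : j < 4 := (Finset.mem_Ico.mp hj).2
        simp [bI, show ¬(4 ≤ j) by omega])
    rw [z1, zero_add, Finset.sum_Ico_eq_sum_range]
    exact Finset.sum_congr (by norm_num) (fun k _ => by
      have h1 : 4 + k - 4 = k := by omega
      simp [h1])
  have s3 : (∑ i ∈ Finset.range 35, (if 4 ≤ i then bI (ebit w b i && uu (i - 4)) else 0))
      = ∑ j ∈ Finset.range 31, bI (ebit w b (4 + j) && uu j) := by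
    rw [Finset.range_eq_Ico,
        ← Finset.sum_Ico_consecutive _ (show (0:ℕ) ≤ 4 by omega) (show (4:ℕ) ≤ 35 by omega)]
    have z1 : (∑ i ∈ Finset.Ico 0 4, (if 4 ≤ i then bI (ebit w b i && uu (i - 4)) else 0)) = 0 :=
      Finset.sum_eq_zero (fun j hj => by
        have : j < 4 := (Finset.mem_Ico.mp hj).2
        simp [show ¬(4 ≤ j) by omega])
    rw [z1, zero_add, Finset.sum_Ico_eq_sum_range]
    exact Finset.sum_congr (by norm_num) (fun k _ => by
      have h1 : 4 + k - 4 = k := by omega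
      simp [h1])
  have s4 : (∑ i ∈ Finset.range 35, (if 5 ≤ i then bI (ebit w b i && uu (i - 5)) else 0))
      = ∑ j ∈ Finset.range 30, bI (ebit w b (5 + j) && uu j) := by
    rw [Finset.range_eq_Ico,
        ← Finset.sum_Ico_consecutive _ (show (0:ℕ) ≤ 5 by omega) (show (5:ℕ) ≤ 35 by omega)]
    have z1 : (∑ i ∈ Finset.Ico 0 5, (if 5 ≤ i then bI (ebit w b i && uu (i - 5)) else 0)) = 0 :=
      Finset.sum_eq_zero (fun j hj => by
        have : j < 5 := (Finset.mem_Ico.mp hj).2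
        simp [show ¬(5 ≤ j) by omega])
    rw [z1, zero_add, Finset.sum_Ico_eq_sum_range]
    exact Finset.sum_congr (by norm_num) (fun k _ => by
      have h1 : 5 + k - 5 = k := by omega
      simp [h1])
  have hR : (∑ i ∈ Finset.range 35, (if ebit w b i then
      bI (dd (5 + i)) + bI (dd (4 + i))
      + (if 4 ≤ i then bI (uu (i - 4)) else 0)
      + (if 5 ≤ i then bI (uu (i - 5)) else 0) else 0))
      = ∑ i ∈ Finset.range 35, (bI (ebit w b i && dd (5 + i)) + bI (ebit w b i && dd (4 + i))
        + (if 4 ≤ i then bI (ebit w b i && uu (i - 4)) else 0)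
        + (if 5 ≤ i then bI (ebit w b i && uu (i - 5)) else 0)) :=
    Finset.sum_congr rfl (fun i _ => by
      cases h : ebit w b i
      · simp [bI]
      · simp)
  rw [hR, Finset.sum_add_distrib, Finset.sum_add_distrib, Finset.sum_add_distrib,
      s1, s2, s3, s4]

lemma B_eval (w b down up : Int) :
    (PySem.List.pyRange 0 35).foldl (fun (total i : Int) =>
      if PySem.Int.band (borderMask >>> i.toNat) 1 ≠ 0 ∧
         PySem.Int.band (w >>> i.toNat) 1 = 0 ∧
         PySem.Int.band (b >>> i.toNat) 1 = 0 then
        let total := total + PySem.Int.band (down >>> (i + 5).toNat) 1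
        let total := total + PySem.Int.band (down >>> (i + 4).toNat) 1
        let total := if 4 ≤ i then total + PySem.Int.band (up >>> (i - 4).toNat) 1 else total
        if 5 ≤ i then total + PySem.Int.band (up >>> (i - 5).toNat) 1 else total
      else total) 0
    = ∑ i ∈ Finset.range 35, (if ebit w b i then
        bI (down.testBit (5 + i)) + bI (down.testBit (4 + i))
        + (if 4 ≤ i then bI (up.testBit (i - 4)) else 0)
        + (if 5 ≤ i then bI (up.testBit (i - 5)) else 0) else 0) := by
  rw [show (35 : Int) = ((35 : Nat) : Int) from by norm_num, PySem.List.pyRange_zero_natCast,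
      List.foldl_map]
  rw [PySem.List.foldl_congr_mem _ _
    (fun (total : Int) (iN : Nat) => total + (if ebit w b iN then
        bI (down.testBit (5 + iN)) + bI (down.testBit (4 + iN))
        + (if 4 ≤ iN then bI (up.testBit (iN - 4)) else 0)
        + (if 5 ≤ iN then bI (up.testBit (iN - 5)) else 0) else 0)) 0
    (by
      intro acc iN _
      have h0 : ((iN : Int)).toNat = iN := by omega
      have h5 : ((iN : Int) + 5).toNat = 5 + iN := by omega
      have h4 : ((iN : Int) + 4).toNat = 4 + iN := by omega
      have hm4 : ((iN : Int) - 4).toNat = iN - 4 := by omega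
      have hm5 : ((iN : Int) - 5).toNat = iN - 5 := by omega
      have hc4 : (4 ≤ (iN : Int)) ↔ 4 ≤ iN := by omega
      have hc5 : (5 ≤ (iN : Int)) ↔ 5 ≤ iN := by omega
      simp only [h0, h5, h4, hm4, hm5, ibit]
      have hiff : (bI (borderMask.testBit iN) ≠ 0 ∧ bI (w.testBit iN) = 0 ∧ bI (b.testBit iN) = 0)
          ↔ ebit w b iN = true := by
        cases hB : borderMask.testBit iN <;> cases hW : w.testBit iN <;>
          cases hBk : b.testBit iN <;> simp [ebit, hB, hW, hBk, bI]
      by_cases heb : ebit w b iN = true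
      · rw [if_pos (hiff.mpr heb), if_pos heb]
        simp only [hc4, hc5]
        split_ifs <;> ring
      · rw [if_neg (fun hc => heb (hiff.mp hc)), if_neg heb]
        ring)]
  rw [PySem.List.foldl_add, sum_range_list]
  simp

-- the digit list bin() renders, as a structural recursion
def binAux (n : Nat) : List Char :=
  if _h : n = 0 then [] else binAux (n / 2) ++ [Nat.digitChar (n % 2)]
termination_by n
decreasing_by exact Nat.div_lt_self (by omega) (by omega)

lemma toDigitsCore_two_eq : ∀ (f n : Nat) (ds : List Char), 0 < n → n < f →
    Nat.toDigitsCore 2 f n ds = binAux n ++ ds := by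
  intro f
  induction f with
  | zero => intro n ds h1 h2; omega
  | succ f ih =>
    intro n ds h1 h2
    rw [Nat.toDigitsCore]
    by_cases hz : n / 2 = 0
    · rw [if_pos hz, binAux, dif_neg (by omega), hz, binAux, dif_pos rfl]
      simp
    · rw [if_neg hz, ih (n / 2) _ (by omega) (by omega)]
      conv_rhs => rw [binAux]
      rw [dif_neg (show ¬(n = 0) by omega)]
      simp

lemma toDigits_two (n : Nat) (h : 0 < n) : Nat.toDigits 2 n = binAux n := by
  rw [Nat.toDigits, toDigitsCore_two_eq (n + 1) n [] h (by omega)]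
  simp

lemma countP_binAux (n : Nat) : (binAux n).countP (· == '1') = pc n := by
  induction n using Nat.strong_induction_on with
  | _ n ih =>
    by_cases h : n = 0
    · subst h; rw [binAux, dif_pos rfl, pc, dif_pos rfl]; rfl
    · rw [binAux, dif_neg h, pc, dif_neg h, List.countP_append,
        ih (n / 2) (Nat.div_lt_self (by omega) (by omega))]
      rcases Nat.mod_two_eq_zero_or_one n with h2 | h2 <;> rw [h2] <;> rfl

-- A's scan of bin(m), started at acc, adds exactly the popcount of m (nonnegative m)
lemma scan_eq_pc (m : Int) (hm : 0 ≤ m) (acc : Int) :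
    (PySem.Int.pyBin m).toList.foldl (fun acc bit => acc + (if bit = '1' then 1 else 0)) acc
      = acc + (pc m.toNat : Int) := by
  obtain ⟨n, rfl⟩ : ∃ n : Nat, m = (n : Int) := ⟨m.toNat, (Int.toNat_of_nonneg hm).symm⟩
  rw [PySem.Int.toList_pyBin, PySem.Int.toBinChars0b, if_neg (by omega)]
  have hfold : ∀ (l : List Char) (a : Int),
      l.foldl (fun acc bit => acc + (if bit = '1' then 1 else 0)) a
        = a + (l.countP (· == '1') : Int) := by
    intro l a
    rw [PySem.List.foldl_add l (fun bit => if bit = '1' then 1 else 0) a]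
    have : (l.map fun bit => if bit = '1' then (1:Int) else 0)
         = (l.map fun bit => if (· == '1') bit then (1:Int) else 0) := by
      simp
    rw [this, PySem.List.sum_map_ite_one_zero]
  rw [hfold]
  simp only [Int.toNat_natCast, List.countP_cons]
  norm_num
  by_cases h : n = 0
  · subst h
    have : Nat.toDigits 2 0 = ['0'] := rfl
    rw [this]
    simp [pc]
  · rw [toDigits_two n (Nat.pos_of_ne_zero h), countP_binAux]


-- ===== VERDICT (by name: the statement is the Claim_ definition above) =====
theorem freeMovement_spec : Claim_equal_freeMovement := by
  intro whiteParam blackParam kingParam colorParam _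
  unfold Spec_freeMovement freeMovement freeMovement_alt
  set e : Int := PySem.Int.band (PySem.Int.band (Int.not whiteParam) (Int.not blackParam)) borderMask with he
  have he0 : 0 ≤ e := by
    rw [he, PySem.Int.band_comm]
    exact PySem.Int.band_nonneg_of_nonneg_left _ (by decide)
  have hsl : ∀ s : Nat, 0 ≤ e <<< s := fun s => by rw [Int.shiftLeft_eq]; positivity
  have hsr : ∀ s : Nat, 0 ≤ e >>> s := fun s => Int.le_shiftRight_of_nonneg he0
  have hetb : ∀ j, e.testBit j = ebit whiteParam blackParam j := fun j => by
    rw [he]; exact e_testBit whiteParam blackParam j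
  have hshl : ∀ (s j : Nat), (e <<< s).testBit j
      = (decide (s ≤ j) && ebit whiteParam blackParam (j - s)) := fun s j => by
    rw [shl_testBit e he0, hetb]
  have hshr : ∀ (s j : Nat), (e >>> s).testBit j = ebit whiteParam blackParam (s + j) :=
    fun s j => by rw [testBit_shiftRightI, hetb]
  by_cases hc : colorParam == "BLACK"
  · simp only [hc, if_true]
    rw [scan_eq_pc _ (PySem.Int.band_nonneg_of_nonneg_left _ (hsl 5)) _,
        scan_eq_pc _ (PySem.Int.band_nonneg_of_nonneg_left _ (hsl 4)) _,
        scan_eq_pc _ (PySem.Int.band_nonneg_of_nonneg_left _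
          (PySem.Int.band_nonneg_of_nonneg_left _ (hsr 4))) _,
        scan_eq_pc _ (PySem.Int.band_nonneg_of_nonneg_left _
          (PySem.Int.band_nonneg_of_nonneg_left _ (hsr 5))) _,
        B_eval whiteParam blackParam blackParam (PySem.Int.band blackParam kingParam)]
    have hDR : (pc (PySem.Int.band (e <<< (5:Nat)) blackParam).toNat : Int)
        = ∑ j ∈ Finset.range 40, bI ((decide (5 ≤ j) && ebit whiteParam blackParam (j - 5)) && blackParam.testBit j) := by
      rw [pcBand _ _ (hsl 5) 40 (fun j hj => by
        rw [hshl]; simp [ebit_vanish whiteParam blackParam (j - 5) (by omega)])]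
      exact Finset.sum_congr rfl (fun j _ => by rw [hshl])
    have hDL : (pc (PySem.Int.band (e <<< (4:Nat)) blackParam).toNat : Int)
        = ∑ j ∈ Finset.range 39, bI ((decide (4 ≤ j) && ebit whiteParam blackParam (j - 4)) && blackParam.testBit j) := by
      rw [pcBand _ _ (hsl 4) 39 (fun j hj => by
        rw [hshl]; simp [ebit_vanish whiteParam blackParam (j - 4) (by omega)])]
      exact Finset.sum_congr rfl (fun j _ => by rw [hshl])
    have hUR : (pc (PySem.Int.band (PySem.Int.band (e >>> (4:Nat)) blackParam) kingParam).toNat : Int)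
        = ∑ j ∈ Finset.range 31, bI (ebit whiteParam blackParam (4 + j) && (blackParam.testBit j && kingParam.testBit j)) := by
      rw [pcBand _ _ (PySem.Int.band_nonneg_of_nonneg_left _ (hsr 4)) 31 (fun j hj => by
        rw [testBit_band, hshr]
        simp [ebit_vanish whiteParam blackParam (4 + j) (by omega)])]
      exact Finset.sum_congr rfl (fun j _ => by
        rw [testBit_band, hshr, Bool.and_assoc])
    have hUL : (pc (PySem.Int.band (PySem.Int.band (e >>> (5:Nat)) blackParam) kingParam).toNat : Int)
        = ∑ j ∈ Finset.range 30, bI (ebit whiteParam blackParam (5 + j) && (blackParam.testBit j && kingParam.testBit j)) := by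
      rw [pcBand _ _ (PySem.Int.band_nonneg_of_nonneg_left _ (hsr 5)) 30 (fun j hj => by
        rw [testBit_band, hshr]
        simp [ebit_vanish whiteParam blackParam (5 + j) (by omega)])]
      exact Finset.sum_congr rfl (fun j _ => by
        rw [testBit_band, hshr, Bool.and_assoc])
    rw [hDR, hDL, hUR, hUL, zero_add,
        assemble whiteParam blackParam (fun j => blackParam.testBit j)
          (fun j => blackParam.testBit j && kingParam.testBit j)]
    exact Finset.sum_congr rfl (fun i _ => by simp only [testBit_band])
  · simp only [hc, Bool.false_eq_true, if_false]
    rw [scan_eq_pc _ (PySem.Int.band_nonneg_of_nonneg_left _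
          (PySem.Int.band_nonneg_of_nonneg_left _ (hsl 5))) _,
        scan_eq_pc _ (PySem.Int.band_nonneg_of_nonneg_left _
          (PySem.Int.band_nonneg_of_nonneg_left _ (hsl 4))) _,
        scan_eq_pc _ (PySem.Int.band_nonneg_of_nonneg_left _ (hsr 4)) _,
        scan_eq_pc _ (PySem.Int.band_nonneg_of_nonneg_left _ (hsr 5)) _,
        B_eval whiteParam blackParam (PySem.Int.band whiteParam kingParam) whiteParam]
    have hDR : (pc (PySem.Int.band (PySem.Int.band (e <<< (5:Nat)) whiteParam) kingParam).toNat : Int)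
        = ∑ j ∈ Finset.range 40, bI ((decide (5 ≤ j) && ebit whiteParam blackParam (j - 5)) && (whiteParam.testBit j && kingParam.testBit j)) := by
      rw [pcBand _ _ (PySem.Int.band_nonneg_of_nonneg_left _ (hsl 5)) 40 (fun j hj => by
        rw [testBit_band, hshl]
        simp [ebit_vanish whiteParam blackParam (j - 5) (by omega)])]
      exact Finset.sum_congr rfl (fun j _ => by
        rw [testBit_band, hshl, Bool.and_assoc])
    have hDL : (pc (PySem.Int.band (PySem.Int.band (e <<< (4:Nat)) whiteParam) kingParam).toNat : Int)
        = ∑ j ∈ Finset.range 39, bI ((decide (4 ≤ j) && ebit whiteParam blackParam (j - 4)) && (whiteParam.testBit j && kingParam.testBit j)) := by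
      rw [pcBand _ _ (PySem.Int.band_nonneg_of_nonneg_left _ (hsl 4)) 39 (fun j hj => by
        rw [testBit_band, hshl]
        simp [ebit_vanish whiteParam blackParam (j - 4) (by omega)])]
      exact Finset.sum_congr rfl (fun j _ => by
        rw [testBit_band, hshl, Bool.and_assoc])
    have hUR : (pc (PySem.Int.band (e >>> (4:Nat)) whiteParam).toNat : Int)
        = ∑ j ∈ Finset.range 31, bI (ebit whiteParam blackParam (4 + j) && whiteParam.testBit j) := by
      rw [pcBand _ _ (hsr 4) 31 (fun j hj => by
        rw [hshr]; simp [ebit_vanish whiteParam blackParam (4 + j) (by omega)])]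
      exact Finset.sum_congr rfl (fun j _ => by rw [hshr])
    have hUL : (pc (PySem.Int.band (e >>> (5:Nat)) whiteParam).toNat : Int)
        = ∑ j ∈ Finset.range 30, bI (ebit whiteParam blackParam (5 + j) && whiteParam.testBit j) := by
      rw [pcBand _ _ (hsr 5) 30 (fun j hj => by
        rw [hshr]; simp [ebit_vanish whiteParam blackParam (5 + j) (by omega)])]
      exact Finset.sum_congr rfl (fun j _ => by rw [hshr])
    rw [hDR, hDL, hUR, hUL, zero_add,
        assemble whiteParam blackParam (fun j => whiteParam.testBit j && kingParam.testBit j)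
          (fun j => whiteParam.testBit j)]
    exact Finset.sum_congr rfl (fun i _ => by simp only [testBit_band])
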